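-- pv_equiv track=rewrite | github.com/rlagusgh0223/Algorithm | 231231/프로그래머스, 명예의 전당(1).py | solution
-- ===== SOURCE A (Python) =====
-- def solution(k, score):
--     answer = []
--     check = []
--     for s in score:
--         check.append(s)
--         if len(check) > k:
--             check.remove(min(check))
--         answer.append(min(check))
--     return answer
-- ===== SOURCE B (Python) =====
-- def _insert(top, s):
--     # insert s into the ascending list top, keeping it sorted
--     i = 0
--     while i < len(top) and top[i] <= s:
--         i += 1
--     return top[:i] + [s] + top[i:]
--
-- def solution(k, score):
--     answer = []
--     top = []  # ascending list of the current top-k scores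
--     for s in score:
--         top = _insert(top, s)
--         if len(top) > k:
--             top = top[1:]
--         answer.append(top[0])
--     return answer
-- ===== Notes on version B (the rewrite author's own statement) =====
-- stated objective: faster
-- what changed: B keeps the running top-k as an explicitly sorted list (insert in place, drop the head when over k, answer is the head), instead of A's per-step min() scan plus remove() on an unordered list.
import Mathlib
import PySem

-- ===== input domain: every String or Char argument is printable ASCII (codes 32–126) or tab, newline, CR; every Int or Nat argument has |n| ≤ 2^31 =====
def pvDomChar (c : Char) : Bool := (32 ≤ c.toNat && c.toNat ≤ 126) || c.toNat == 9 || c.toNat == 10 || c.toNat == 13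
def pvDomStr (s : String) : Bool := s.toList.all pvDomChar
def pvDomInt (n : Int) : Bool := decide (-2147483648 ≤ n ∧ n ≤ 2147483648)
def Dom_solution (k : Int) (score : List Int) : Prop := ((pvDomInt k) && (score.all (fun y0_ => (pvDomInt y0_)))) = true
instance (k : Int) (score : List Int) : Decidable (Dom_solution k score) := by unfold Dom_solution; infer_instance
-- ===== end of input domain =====

-- B maintains the running top-k as an explicitly sorted list (insert in place, drop the
-- head when over k, answer is the head) instead of A's per-step min() scan plus remove().


-- ===== PORT A =====
-- one step of A's loop body; the `none` branches are where Python's min([]) raises (outside Pre_)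
def solStepA (k : Int) (st : List Int × List Int) (s : Int) : List Int × List Int :=
  let check0 := st.2 ++ [s]
  let check :=
    if k < (check0.length : Int) then
      match PySem.List.min? check0 (fun x => x) with
      | some m => (PySem.List.remove? check0 m).getD check0
      | none => check0
    else check0
  match PySem.List.min? check (fun x => x) with
  | some m => (st.1 ++ [m], check)
  | none => (st.1, check)

def solution (k : Int) (score : List Int) : List Int :=
  (score.foldl (solStepA k) ([], [])).1

-- ===== PORT B =====
-- Source B's _insert: scan past the elements ≤ s, insert s there
def insTop : List Int → Int → List Int
  | [], s => [s]
  | x :: xs, s => if x ≤ s then x :: insTop xs s else s :: x :: xs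

-- one step of B's loop body; the `[]` branch is where Python's top[0] raises (outside Pre_)
def solStepB (k : Int) (st : List Int × List Int) (s : Int) : List Int × List Int :=
  let top0 := insTop st.2 s
  let top := if k < (top0.length : Int) then top0.tail else top0
  match top with
  | m :: _ => (st.1 ++ [m], top)
  | [] => (st.1, top)

def solution_alt (k : Int) (score : List Int) : List Int :=
  (score.foldl (solStepB k) ([], [])).1

-- ===== PRECONDITION & SPEC =====
-- Pre_ excludes k ≤ 0 with a nonempty score: there A's min([]) raises ValueError
-- (and B's top[0] raises IndexError) at the first iteration.
def Pre_solution (k : Int) (score : List Int) : Prop := 1 ≤ k ∨ score = []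
instance (k : Int) (score : List Int) : Decidable (Pre_solution k score) := by unfold Pre_solution; infer_instance
def pvWitness_solution : Int × List Int := (3, [10, 100, 20, 150, 1, 100, 200])

def Spec_solution (k : Int) (score : List Int) (out : List Int) : Prop := out = solution_alt k score
instance (k : Int) (score : List Int) (out : List Int) : Decidable (Spec_solution k score out) := by unfold Spec_solution; infer_instance

-- ===== CLAIM (what is proved, stated in full; the proofs are below) =====
def Claim_equal_solution : Prop := ∀ (k : Int) (score : List Int), Dom_solution k score → Pre_solution k score → Spec_solution k score (solution k score)

-- ===== LEMMAS AND PROOFS =====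

-- the invariant tying A's loop state to B's: same answers so far, B's pool is a sorted
-- rearrangement of A's pool
def StInv (a b : List Int × List Int) : Prop :=
  a.1 = b.1 ∧ a.2.Perm b.2 ∧ b.2.Pairwise (· ≤ ·)

theorem insTop_perm (l : List Int) (s : Int) : (insTop l s).Perm (s :: l) := by
  induction l with
  | nil => simp [insTop]
  | cons x xs ih =>
      simp only [insTop]
      split
      · exact ((ih.cons x).trans (List.Perm.swap s x xs))
      · exact List.Perm.refl _

theorem insTop_sorted (l : List Int) (s : Int) (h : l.Pairwise (· ≤ ·)) :
    (insTop l s).Pairwise (· ≤ ·) := by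
  induction l with
  | nil => simp [insTop]
  | cons x xs ih =>
      rcases List.pairwise_cons.1 h with ⟨hx, hxs⟩
      simp only [insTop]
      split
      · rename_i hxle
        refine List.pairwise_cons.2 ⟨?_, ih hxs⟩
        intro y hy
        have hys : y ∈ s :: xs := (insTop_perm xs s).mem_iff.1 hy
        rcases List.mem_cons.1 hys with rfl | h1
        · omega
        · exact hx y h1
      · rename_i hgt
        refine List.pairwise_cons.2 ⟨?_, List.pairwise_cons.2 ⟨hx, hxs⟩⟩
        intro y hy
        rcases List.mem_cons.1 hy with rfl | h1
        · omega
        · have := hx y h1; omega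

theorem insTop_ne_nil (l : List Int) (s : Int) : insTop l s ≠ [] := by
  cases l with
  | nil => simp [insTop]
  | cons x xs => simp only [insTop]; split <;> simp

-- min of any rearrangement of a sorted nonempty list is its head
theorem min?_of_perm_sorted (c : List Int) (m : Int) (t : List Int)
    (hp : c.Perm (m :: t)) (hs : (m :: t).Pairwise (· ≤ ·)) :
    PySem.List.min? c (fun x => x) = some m := by
  have hc : c ≠ [] := by
    intro h; subst h; exact absurd hp.symm (by simp)
  obtain ⟨x, hx⟩ : ∃ x, PySem.List.min? c (fun x => x) = some x := by
    cases hmin : PySem.List.min? c (fun x => x) with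
    | none => exact absurd ((PySem.List.min?_eq_none_iff c (fun x => x)).1 hmin) hc
    | some x => exact ⟨x, rfl⟩
  have hxmem : x ∈ c := PySem.List.min?_mem hx
  have hxmin : ∀ y ∈ c, x ≤ y := PySem.List.min?_isMin hx
  have hmc : m ∈ c := hp.mem_iff.2 (by simp)
  have hxm : x ≤ m := hxmin m hmc
  have hmx : m ≤ x := by
    have hxl : x ∈ m :: t := hp.mem_iff.1 hxmem
    rcases List.mem_cons.1 hxl with rfl | h1
    · omega
    · exact (List.pairwise_cons.1 hs).1 x h1
  rw [hx, le_antisymm hxm hmx]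

-- one loop step preserves the invariant (for k ≥ 1)
theorem step_inv (k : Int) (hk : 1 ≤ k) (s : Int) (a b : List Int × List Int)
    (h : StInv a b) : StInv (solStepA k a s) (solStepB k b s) := by
  obtain ⟨hans, hperm, hsort⟩ := h
  have hperm0 : (a.2 ++ [s]).Perm (insTop b.2 s) :=
    ((List.perm_append_singleton s a.2).trans (hperm.cons s)).trans (insTop_perm b.2 s).symm
  have hsort0 : (insTop b.2 s).Pairwise (· ≤ ·) := insTop_sorted b.2 s hsort
  have hlen : (a.2 ++ [s]).length = (insTop b.2 s).length := hperm0.length_eq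
  -- name the head/tail of the sorted pool
  obtain ⟨m, t, htop⟩ : ∃ m t, insTop b.2 s = m :: t := by
    cases h0 : insTop b.2 s with
    | nil => exact absurd h0 (insTop_ne_nil b.2 s)
    | cons m t => exact ⟨m, t, rfl⟩
  have hmin0 : PySem.List.min? (a.2 ++ [s]) (fun x => x) = some m := by
    apply min?_of_perm_sorted _ m t (htop ▸ hperm0) (htop ▸ hsort0)
  by_cases hgt : k < ((a.2 ++ [s]).length : Int)
  · -- pool overflows: A removes its min, B drops its head
    have hgt' : k < ((insTop b.2 s).length : Int) := by rw [← hlen]; exact hgt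
    have hrm : PySem.List.remove? (a.2 ++ [s]) m = some ((a.2 ++ [s]).erase m) :=
      PySem.List.remove?_eq_some_erase (a.2 ++ [s]) m (hperm0.mem_iff.2 (by rw [htop]; simp))
    have hperm1 : ((a.2 ++ [s]).erase m).Perm t := by
      have := hperm0.erase m
      rw [htop] at this
      simpa using this
    have hsort1 : t.Pairwise (· ≤ ·) := by
      have := htop ▸ hsort0; exact (List.pairwise_cons.1 this).2
    -- t is nonempty: the pool has length > k ≥ 1
    obtain ⟨m2, t2, ht2⟩ : ∃ m2 t2, t = m2 :: t2 := by
      cases ht0 : t with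
      | nil =>
          exfalso
          have h1 : (insTop b.2 s).length = 1 := by rw [htop, ht0]; rfl
          omega
      | cons m2 t2 => exact ⟨m2, t2, rfl⟩
    have hmin1 : PySem.List.min? ((a.2 ++ [s]).erase m) (fun x => x) = some m2 :=
      min?_of_perm_sorted _ m2 t2 (ht2 ▸ hperm1) (ht2 ▸ hsort1)
    have hgt2 : k < (((m :: m2 :: t2).length : Nat) : Int) := by
      rw [← ht2, ← htop]; exact hgt'
    refine ⟨?_, ?_, ?_⟩ <;>
      simp only [solStepA, solStepB, hgt, hgt2, if_pos, hmin0, hrm, Option.getD_some,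
        htop, List.tail_cons, ht2, hmin1]
    · rw [hans]
    · exact ht2 ▸ hperm1
    · exact ht2 ▸ hsort1
  · -- pool still fits
    have hgt' : ¬ k < ((insTop b.2 s).length : Int) := by rw [← hlen]; exact hgt
    have hgt2 : ¬ k < (((m :: t).length : Nat) : Int) := by rw [← htop]; exact hgt'
    refine ⟨?_, ?_, ?_⟩ <;>
      simp only [solStepA, solStepB, hgt, hgt2, if_neg, not_false_iff, htop, hmin0]
    · rw [hans]
    · exact htop ▸ hperm0
    · exact htop ▸ hsort0

theorem foldl_inv (k : Int) (hk : 1 ≤ k) (score : List Int) (a b : List Int × List Int)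
    (h : StInv a b) : StInv (score.foldl (solStepA k) a) (score.foldl (solStepB k) b) := by
  induction score generalizing a b with
  | nil => exact h
  | cons s rest ih => exact ih _ _ (step_inv k hk s a b h)

-- ===== VERDICT (by name: the statement is the Claim_ definition above) =====
theorem solution_spec : Claim_equal_solution := by
  intro k score _ hpre
  unfold Spec_solution solution solution_alt
  rcases hpre with hk | hempty
  · exact (foldl_inv k hk score ([], []) ([], []) ⟨rfl, List.Perm.refl _, by simp⟩).1
  · subst hempty; rfl
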